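-- pv_equiv track=rewrite | github.com/stony-letter-strategy-aptitude/btrfs-with-badblocks | src/create_partition.py | excluded_ranges
-- ===== SOURCE A (Python) =====
-- import math
-- from collections.abc import Iterable
--
-- def excluded_ranges(excluded_sectors: Iterable[int], maximum_value: int):
--     MINIMUM_VALUE = 2048
--     excluded_sectors = sorted(excluded_sectors)  # ensure sorted and unique
--     allowed_ranges = []
--     current_start = MINIMUM_VALUE
--     alignment = 2048
--
--     for excluded_sector in excluded_sectors:
--         if excluded_sector < MINIMUM_VALUE:
--             continue  # skip excluded numbers below the minimum
--
--         if current_start < excluded_sector:  # only if there's a gap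
--             start = math.ceil(current_start / alignment) * alignment
--             end = math.floor((excluded_sector - 1) / alignment) * alignment
--             if start < end:
--                 allowed_ranges.append((start, end))
--         current_start = excluded_sector + 1  # skip the excluded number
--
--     if current_start <= maximum_value:  # handle the last range up to max
--         allowed_ranges.append((current_start, maximum_value - 1000))
--
--     return allowed_ranges
-- ===== SOURCE B (Python) =====
-- def excluded_ranges(excluded_sectors, maximum_value):
--     MINIMUM_VALUE = 2048
--     ALIGN = 2048
--     points = sorted({s for s in excluded_sectors if s >= MINIMUM_VALUE})
--     # merge the excluded points into maximal runs [a, b] of consecutive sectors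
--     runs = []
--     for p in points:
--         if runs and runs[-1][1] + 1 == p:
--             runs[-1] = (runs[-1][0], p)
--         else:
--             runs.append((p, p))
--     # cursor (first candidate sector) before each run, and after the last run
--     curs = [MINIMUM_VALUE] + [b + 1 for _, b in runs]
--     last_cur = curs[-1]
--     # build the answer BACK TO FRONT: tail range first, then prepend each aligned gap
--     allowed = [(last_cur, maximum_value - 1000)] if last_cur <= maximum_value else []
--     for (a, _), cur in reversed(list(zip(runs, curs))):
--         if cur < a:
--             start = -(-cur // ALIGN) * ALIGN
--             end = (a - 1) // ALIGN * ALIGN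
--             if start < end:
--                 allowed = [(start, end)] + allowed
--     return allowed
-- ===== Notes on version B (the rewrite author's own statement) =====
-- stated objective: alternative
-- what changed: B replaces A's stateful per-sector forward scan with interval subtraction: it filters+dedups the sectors, merges them into maximal runs of consecutive excluded sectors, precomputes the cursor before each run, and assembles the result back-to-front by a reversed pass prepending each aligned gap to the tail range.
import Mathlib
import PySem

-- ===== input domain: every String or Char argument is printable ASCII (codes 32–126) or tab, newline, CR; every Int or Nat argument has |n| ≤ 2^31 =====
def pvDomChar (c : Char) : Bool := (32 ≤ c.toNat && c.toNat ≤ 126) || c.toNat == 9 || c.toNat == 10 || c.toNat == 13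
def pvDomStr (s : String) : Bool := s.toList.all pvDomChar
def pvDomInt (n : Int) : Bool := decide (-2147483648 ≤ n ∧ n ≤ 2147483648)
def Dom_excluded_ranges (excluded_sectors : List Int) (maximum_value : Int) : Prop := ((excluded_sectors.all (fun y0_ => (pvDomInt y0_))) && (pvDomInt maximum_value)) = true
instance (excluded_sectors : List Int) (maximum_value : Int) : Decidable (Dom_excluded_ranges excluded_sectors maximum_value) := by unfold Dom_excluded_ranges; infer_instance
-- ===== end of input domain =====

-- B replaces A's stateful per-sector forward scan by interval subtraction (merge excluded sectors into maximal
-- consecutive runs, then carve the aligned gaps back-to-front); objective: alternative algorithm, same cost.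

-- ===== PORT A =====
-- math.ceil(x / 2048): exact integer ceiling division for |x| ≤ 2^31 (x/2048 is an exact binary float there)
def aCeil2048 (x : Int) : Int := -(PySem.Int.floordiv (-x) 2048)

-- loop body of A: state = (allowed_ranges, current_start)
def aStep (st : List (Int × Int) × Int) (s : Int) : List (Int × Int) × Int :=
  if s < 2048 then st
  else
    let acc :=
      if st.2 < s then
        let start := aCeil2048 st.2 * 2048
        let en := PySem.Int.floordiv (s - 1) 2048 * 2048
        if start < en then st.1 ++ [(start, en)] else st.1
      else st.1
    (acc, s + 1)

def excluded_ranges (excluded_sectors : List Int) (maximum_value : Int) : List (Int × Int) :=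
  let st := (PySem.List.sorted excluded_sectors (fun x => x) false).foldl aStep ([], 2048)
  if st.2 ≤ maximum_value then st.1 ++ [(st.2, maximum_value - 1000)] else st.1

-- ===== PORT B =====
-- run-merging loop body: extend the last run if the point is its successor, else open a new run
def bRunStep (acc : List (Int × Int)) (p : Int) : List (Int × Int) :=
  match acc.getLast? with
  | some r => if r.2 + 1 = p then acc.dropLast ++ [(r.1, p)] else acc ++ [(p, p)]
  | none => acc ++ [(p, p)]

-- body of the reversed loop: prepend the aligned gap before run x.1 given cursor x.2, if non-degenerate
def bEmit (x : (Int × Int) × Int) (acc : List (Int × Int)) : List (Int × Int) :=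
  if x.2 < x.1.1 then
    let start := -(PySem.Int.floordiv (-x.2) 2048) * 2048
    let en := PySem.Int.floordiv (x.1.1 - 1) 2048 * 2048
    if start < en then (start, en) :: acc else acc
  else acc

-- a reversed-list loop that prepends is List.foldr over the zip; curs is nonempty so getLastD's default is unused
def excluded_ranges_alt (excluded_sectors : List Int) (maximum_value : Int) : List (Int × Int) :=
  let points := PySem.List.sorted (PySem.Set.ofList (excluded_sectors.filter (fun s => decide (2048 ≤ s)))) (fun x => x) false
  let runs := points.foldl bRunStep []
  let curs := (2048 : Int) :: runs.map (fun r => r.2 + 1)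
  let lastCur := curs.getLastD 0
  let base := if lastCur ≤ maximum_value then [(lastCur, maximum_value - 1000)] else []
  (runs.zip curs).foldr bEmit base

-- ===== PRECONDITION & SPEC =====
def Spec_excluded_ranges (excluded_sectors : List Int) (maximum_value : Int) (out : List (Int × Int)) : Prop := out = excluded_ranges_alt excluded_sectors maximum_value
instance (excluded_sectors : List Int) (maximum_value : Int) (out : List (Int × Int)) : Decidable (Spec_excluded_ranges excluded_sectors maximum_value out) := by unfold Spec_excluded_ranges; infer_instance

-- ===== CLAIM =====
def Claim_equal_excluded_ranges : Prop := ∀ (excluded_sectors : List Int) (maximum_value : Int), Dom_excluded_ranges excluded_sectors maximum_value → Spec_excluded_ranges excluded_sectors maximum_value (excluded_ranges excluded_sectors maximum_value)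

-- ===== LEMMAS AND PROOFS =====

-- consecutive-duplicate removal (on a sorted list = full dedup)
def ddup : List Int → List Int
  | [] => []
  | [a] => [a]
  | a :: b :: t => if a = b then ddup (a :: t) else a :: ddup (b :: t)
termination_by l => l.length

-- run-merging of a point list, seeded with the open run (a, b)
def mrg (a b : Int) : List Int → List (Int × Int)
  | [] => [(a, b)]
  | p :: t => if b + 1 = p then mrg a p t else (a, b) :: mrg p p t

def mrgRep : List Int → List (Int × Int)
  | [] => []
  | p :: t => mrg p p t

-- reference recursion over the point list (gap before p, then continue at p+1)
def pfree (mv : Int) : Int → List Int → List (Int × Int)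
  | cur, [] => if cur ≤ mv then [(cur, mv - 1000)] else []
  | cur, p :: t =>
      let tail := pfree mv (p + 1) t
      if cur < p then
        let start := -(PySem.Int.floordiv (-cur) 2048) * 2048
        let en := PySem.Int.floordiv (p - 1) 2048 * 2048
        if start < en then (start, en) :: tail else tail
      else tail

-- reference recursion over the run list
def rfree (mv : Int) : Int → List (Int × Int) → List (Int × Int)
  | cur, [] => if cur ≤ mv then [(cur, mv - 1000)] else []
  | cur, r :: rs => bEmit (r, cur) (rfree mv (r.2 + 1) rs)

theorem mem_ddup (x : Int) (l : List Int) : x ∈ ddup l ↔ x ∈ l := by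
  induction l using ddup.induct with
  | case1 => simp [ddup]
  | case2 a => simp [ddup]
  | case3 b t ih =>
      rw [show ddup (b :: b :: t) = ddup (b :: t) from by simp [ddup], ih]
      simp
  | case4 a b t hab ih => simp only [ddup, if_neg hab, List.mem_cons]; rw [ih]; simp

theorem ddup_pairwise_lt (l : List Int) (h : l.Pairwise (· ≤ ·)) : (ddup l).Pairwise (· < ·) := by
  induction l using ddup.induct with
  | case1 => simp [ddup]
  | case2 a => simp [ddup]
  | case3 b t ih =>
      rw [show ddup (b :: b :: t) = ddup (b :: t) from by simp [ddup]]
      exact ih (List.pairwise_cons.mp h).2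
  | case4 a b t hab ih =>
      simp only [ddup, if_neg hab]
      rcases List.pairwise_cons.mp h with ⟨ha, hbt⟩
      refine List.pairwise_cons.mpr ⟨?_, ih hbt⟩
      intro y hy
      have hyin : y ∈ b :: t := (mem_ddup y (b :: t)).mp hy
      have hby : b ≤ y := by
        rcases hyin with _ | hyt
        · exact le_refl _
        · exact List.rel_of_pairwise_cons hbt ‹_›
      have hab2 : a ≤ b := ha b (by simp)
      omega

theorem foldl_aStep_skip (l : List Int) (st : List (Int × Int) × Int) :
    l.foldl aStep st = (l.filter (fun s => decide (2048 ≤ s))).foldl aStep st := by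
  induction l generalizing st with
  | nil => rfl
  | cons s t ih =>
      by_cases hs : (2048 : Int) ≤ s
      · simp [hs, ih]
      · have h0 : aStep st s = st := by simp [aStep, show s < 2048 by omega]
        simp [show ¬ ((2048:Int) ≤ s) from hs, h0, ih]

theorem foldl_aStep_ddup (l : List Int) (h : ∀ s ∈ l, (2048 : Int) ≤ s)
    (st : List (Int × Int) × Int) : l.foldl aStep st = (ddup l).foldl aStep st := by
  induction l using ddup.induct generalizing st with
  | case1 => simp [ddup]
  | case2 a => simp [ddup]
  | case3 b t ih =>
      have hb : (2048 : Int) ≤ b := h b (by simp)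
      have step2 : aStep (aStep st b) b = aStep st b := by
        simp [aStep, show ¬ b < 2048 by omega]
      calc (b :: b :: t).foldl aStep st = t.foldl aStep (aStep (aStep st b) b) := by simp
        _ = (b :: t).foldl aStep st := by rw [step2]; simp
        _ = (ddup (b :: t)).foldl aStep st := ih (fun s hs => h s (by simp at hs ⊢; tauto)) st
        _ = (ddup (b :: b :: t)).foldl aStep st := by simp [ddup]
  | case4 a b t hab ih =>
      simp only [ddup, if_neg hab, List.foldl_cons]
      exact ih (fun s hs => h s (by simp at hs ⊢; tauto)) (aStep st a)

-- B's point list is exactly the consecutive-dedup of the ≥2048-filtered sorted list A scans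
theorem points_eq (xs : List Int) :
    PySem.List.sorted (PySem.Set.ofList (xs.filter (fun s => decide (2048 ≤ s)))) (fun x => x) false
      = ddup ((PySem.List.sorted xs (fun x => x) false).filter (fun s => decide (2048 ≤ s))) := by
  apply PySem.List.sorted_eq_of_perm_of_pairwise_lt
  · apply (List.perm_ext_iff_of_nodup ?_ ?_).mpr
    · intro a
      simp [mem_ddup, List.mem_filter, PySem.List.mem_sorted, PySem.Set.mem_ofList]
    · exact List.Pairwise.imp (fun h => ne_of_lt h)
        (ddup_pairwise_lt _ ((PySem.List.sorted_pairwise xs (fun x => x)).filter _))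
    · exact PySem.Set.nodup_ofList _
  · exact ddup_pairwise_lt _ ((PySem.List.sorted_pairwise xs (fun x => x)).filter _)

-- A's scan plus final tail = the reference point recursion pfree
theorem a_eq_pfree (mv : Int) (l : List Int) (h : ∀ s ∈ l, (2048 : Int) ≤ s)
    (acc : List (Int × Int)) (cur : Int) :
    (let st := l.foldl aStep (acc, cur);
     if st.2 ≤ mv then st.1 ++ [(st.2, mv - 1000)] else st.1) = acc ++ pfree mv cur l := by
  induction l generalizing acc cur with
  | nil => simp only [List.foldl_nil, pfree]; split_ifs <;> simp
  | cons s t ih =>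
      have hs : (2048 : Int) ≤ s := h s (by simp)
      have ht : ∀ x ∈ t, (2048 : Int) ≤ x := fun x hx => h x (by simp [hx])
      simp only [List.foldl_cons, aStep, aCeil2048, show ¬ s < 2048 by omega, pfree]
      by_cases hg : cur < s
      · simp only [if_pos hg]
        by_cases hse : -(PySem.Int.floordiv (-cur) 2048) * 2048 < PySem.Int.floordiv (s - 1) 2048 * 2048
        · simp only [if_pos hse]
          rw [ih ht]
          simp
        · simp only [if_neg hse]
          exact ih ht _ _
      · simp only [if_neg hg]
        exact ih ht _ _

-- the run-merging fold computes mrg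
theorem foldl_bRunStep (l : List Int) (acc : List (Int × Int)) (a b : Int) :
    l.foldl bRunStep (acc ++ [(a, b)]) = acc ++ mrg a b l := by
  induction l generalizing acc a b with
  | nil => simp [mrg]
  | cons p t ih =>
      have hstep : bRunStep (acc ++ [(a, b)]) p =
          if b + 1 = p then acc ++ [(a, p)] else (acc ++ [(a, b)]) ++ [(p, p)] := by
        simp [bRunStep]
      by_cases hc : b + 1 = p
      · simp only [List.foldl_cons, hstep, if_pos hc, ih, mrg]
      · simp only [List.foldl_cons, hstep, if_neg hc, ih, mrg]
        simp

theorem foldl_bRunStep_nil (l : List Int) : l.foldl bRunStep [] = mrgRep l := by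
  cases l with
  | nil => rfl
  | cons p t =>
      have h0 : bRunStep [] p = [(p, p)] := by simp [bRunStep]
      calc (p :: t).foldl bRunStep [] = t.foldl bRunStep ([] ++ [(p, p)]) := by simp [h0]
        _ = [] ++ mrg p p t := foldl_bRunStep t [] p p
        _ = mrgRep (p :: t) := by simp [mrgRep]

-- mrg's first run has an end and tail independent of the run start
theorem mrg_shape (t : List Int) (b : Int) :
    ∃ e rs, ∀ a, mrg a b t = (a, e) :: rs := by
  induction t generalizing b with
  | nil => exact ⟨b, [], fun a => rfl⟩
  | cons q t' ih =>
      by_cases hc : b + 1 = q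
      · obtain ⟨e, rs, hq⟩ := ih q
        exact ⟨e, rs, fun a => by rw [mrg, if_pos hc]; exact hq a⟩
      · exact ⟨b, mrg q q t', fun a => by rw [mrg, if_neg hc]⟩

-- consuming the first merged run from position p+1 equals continuing rfree at the run's end
theorem rfree_consume (mv : Int) (t : List Int) (p e : Int) (rs : List (Int × Int))
    (h : ∀ a, mrg a p t = (a, e) :: rs) :
    rfree mv (p + 1) (mrgRep t) = rfree mv (e + 1) rs := by
  cases t with
  | nil =>
      have hpe := h p
      simp only [mrg] at hpe
      have he : p = e := congrArg (fun l => (l.headD ((0:Int),(0:Int))).2) hpe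
      have hrs : ([] : List (Int × Int)) = rs := congrArg List.tail hpe
      rw [← he, ← hrs]
      rfl
  | cons q t' =>
      by_cases hc : p + 1 = q
      · have hq : ∀ a, mrg a q t' = (a, e) :: rs := by
          intro a; have := h a; rwa [mrg, if_pos hc] at this
        have hrep : mrgRep (q :: t') = (q, e) :: rs := by simpa [mrgRep] using hq q
        rw [hrep]
        have hne : ¬ (p + 1 < q) := by omega
        simp [rfree, bEmit, hne]
      · have hpe := h p
        rw [mrg, if_neg hc] at hpe
        have he : p = e := congrArg (fun l => (l.headD ((0:Int),(0:Int))).2) hpe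
        have hrs : mrg q q t' = rs := congrArg List.tail hpe
        rw [← he, show mrgRep (q :: t') = mrg q q t' from rfl, hrs]

-- the point recursion equals the run recursion over the merged runs
theorem pfree_eq_rfree (mv : Int) (l : List Int) (cur : Int) :
    pfree mv cur l = rfree mv cur (mrgRep l) := by
  induction l generalizing cur with
  | nil => rfl
  | cons p t ih =>
      obtain ⟨e, rs, h⟩ := mrg_shape t p
      have hrep : mrgRep (p :: t) = (p, e) :: rs := by simpa [mrgRep] using h p
      rw [hrep, rfree, bEmit]
      simp only [pfree, ih, rfree_consume mv t p e rs h]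

-- B's reversed zip pass computes rfree
theorem foldr_bEmit_eq_rfree (mv : Int) (rs : List (Int × Int)) (cur0 : Int) :
    (rs.zip (cur0 :: rs.map (fun r => r.2 + 1))).foldr bEmit
      (if (cur0 :: rs.map (fun r => r.2 + 1)).getLastD 0 ≤ mv
        then [((cur0 :: rs.map (fun r => r.2 + 1)).getLastD 0, mv - 1000)] else [])
      = rfree mv cur0 rs := by
  induction rs generalizing cur0 with
  | nil => simp [rfree]
  | cons r rest ih =>
      simp only [List.map_cons, List.zip_cons_cons, List.foldr_cons]
      have hlast : ((cur0 :: (r.2 + 1) :: rest.map (fun x : Int × Int => x.2 + 1)).getLastD 0)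
          = (((r.2 + 1) :: rest.map (fun x : Int × Int => x.2 + 1)).getLastD 0) := by
        cases h : rest.map (fun x : Int × Int => x.2 + 1) <;> simp [List.getLastD]
      rw [hlast, ih (r.2 + 1)]
      rfl

-- ===== VERDICT =====
theorem excluded_ranges_spec : Claim_equal_excluded_ranges := by
  intro xs mv _
  unfold Spec_excluded_ranges excluded_ranges excluded_ranges_alt
  have hallF : ∀ s ∈ (PySem.List.sorted xs (fun x => x) false).filter
      (fun s => decide (2048 ≤ s)), (2048 : Int) ≤ s := by
    intro s hs
    simpa using (List.mem_filter.mp hs).2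
  have hall : ∀ s ∈ ddup ((PySem.List.sorted xs (fun x => x) false).filter
      (fun s => decide (2048 ≤ s))), (2048 : Int) ≤ s :=
    fun s hs => hallF s ((mem_ddup s _).mp hs)
  simp only [points_eq, foldl_bRunStep_nil, foldr_bEmit_eq_rfree, ← pfree_eq_rfree]
  rw [foldl_aStep_skip, foldl_aStep_ddup _ hallF]
  simpa using a_eq_pfree mv _ hall [] 2048
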